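-- pv_equiv track=rewrite | github.com/linguosaur/language-predictor | mergeElems.py | parse
-- ===== SOURCE A (Python) =====
-- def parse(line, vocab):
--     parsedElems = [] # contains tuples, ((start,end),elem)
--
--     if len(line) == 0: return parsedElems
--
--     [start,end] = [0,1]
--     while end <= len(line):
--         substring = line[start:end]
--         if substring in vocab:
--             parsedElems.append(((start,end),substring))
--         if len([e for e in vocab if type(e) is str and e.startswith(substring) and e != substring]) > 0:
--             end += 1
--         else:
--             start = end
--             end = start + 1
--
--     return parsedElems
-- ===== SOURCE B (Python) =====
-- def parse(line, vocab):
--     # Build a trie over the string members of vocab: node = dict char -> child node,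
--     # with key '' marking "this path is a vocab word".
--     root = {}
--     for w in vocab:
--         if type(w) is str:
--             node = root
--             for ch in w:
--                 node = node.setdefault(ch, {})
--             node[''] = True
--     out = []
--     n = len(line)
--     start = 0
--     while start < n:
--         node = root
--         end = start
--         while True:
--             child = node.get(line[end])
--             if child is None:
--                 # line[start:end+1] is not a prefix of any vocab word
--                 start = end + 1
--                 break
--             end += 1
--             node = child
--             if '' in node:
--                 out.append(((start, end), line[start:end]))
--             if any(k != '' for k in node):
--                 # some vocab word strictly extends line[start:end]
--                 if end == n:
--                     return out
--             else:
--                 start = end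
--                 break
--     return out
-- ===== Notes on version B (the rewrite author's own statement) =====
-- stated objective: faster
-- what changed: Replaces A's per-character full scans of vocab (membership test plus a strict-prefix filter over the whole list at every loop step) with a trie built once from vocab and walked one character at a time, threading the current node; the is_word flag replaces the membership test and the presence of children replaces the strict-prefix filter.
import Mathlib
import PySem

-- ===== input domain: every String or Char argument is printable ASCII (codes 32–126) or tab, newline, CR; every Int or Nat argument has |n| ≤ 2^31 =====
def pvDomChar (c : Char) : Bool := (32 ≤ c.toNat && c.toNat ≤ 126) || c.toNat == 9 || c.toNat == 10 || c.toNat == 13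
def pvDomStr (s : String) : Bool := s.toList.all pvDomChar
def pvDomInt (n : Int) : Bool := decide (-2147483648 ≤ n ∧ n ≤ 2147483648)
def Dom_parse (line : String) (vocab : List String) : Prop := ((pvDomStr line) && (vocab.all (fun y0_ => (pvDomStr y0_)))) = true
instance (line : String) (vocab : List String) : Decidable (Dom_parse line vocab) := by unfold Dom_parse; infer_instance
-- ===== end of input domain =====

-- B replaces A's per-step scans of the whole vocabulary by a trie built once from vocab,
-- walked one character at a time (objective: faster).

-- ===== PORT A =====
-- A's while-loop: state (start, end, parsedElems); end increases by 1 every iteration.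
def parseLoopA (l : List Char) (vocab : List String) (start e : Nat)
    (acc : List ((Int × Int) × String)) : List ((Int × Int) × String) :=
  if h : e ≤ l.length then
    let substring := String.ofList (PySem.List.slice l (some (start : Int)) (some (e : Int)))
    let acc' := if vocab.contains substring then
        acc ++ [(((start : Int), (e : Int)), substring)] else acc
    -- 'type(e) is str' in A's filter is always true here: vocab : List String
    if (vocab.filter (fun v => PySem.Str.startswith v substring && !(v == substring))).length > 0 then
      parseLoopA l vocab start (e + 1) acc'
    else
      parseLoopA l vocab e (e + 1) acc'
  else acc
termination_by l.length + 1 - e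
decreasing_by all_goals omega

def parse (line : String) (vocab : List String) : List ((Int × Int) × String) :=
  if PySem.Str.len line == 0 then [] else parseLoopA line.toList vocab 0 1 []

-- ===== PORT B =====
-- Trie: node = (is_word flag, children); children as an explicit list type (no nested inductive).
mutual
inductive TrieB : Type where
  | mk : Bool → TrieKids → TrieB
inductive TrieKids : Type where
  | nil : TrieKids
  | cons : Char → TrieB → TrieKids → TrieKids
end

def kidGet (cs : TrieKids) (ch : Char) : Option TrieB :=
  match cs with
  | .nil => none
  | .cons c t rest => if c = ch then some t else kidGet rest ch

def hasKids (cs : TrieKids) : Bool :=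
  match cs with
  | .nil => false
  | .cons _ _ _ => true

mutual
-- node.setdefault chain of Source B, then node[''] = True at the end of the word
def trieInsert (t : TrieB) (w : List Char) : TrieB :=
  match t, w with
  | .mk _ cs, [] => .mk true cs
  | .mk b cs, ch :: w' => .mk b (kidsInsert cs ch w')
termination_by (w.length + 1, 0)
def kidsInsert (cs : TrieKids) (ch : Char) (w : List Char) : TrieKids :=
  match cs with
  | .nil => .cons ch (trieInsert (.mk false .nil) w) .nil
  | .cons c t rest =>
      if c = ch then .cons c (trieInsert t w) rest
      else .cons c t (kidsInsert rest ch w)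
termination_by (w.length + 1, sizeOf cs)
end

def trieOfVocab (vocab : List String) : TrieB :=
  -- 'type(w) is str' of Source B is always true here: vocab : List String
  vocab.foldl (fun t w => trieInsert t w.toList) (TrieB.mk false TrieKids.nil)

-- inner while True loop of Source B: walk the trie along line[end], line[end+1], …
-- returns (out, none) for Source B's 'return out', (out, some s) for 'start = s; break'
def walkB (l : List Char) (start e : Nat) (rest : List Char) (nd : TrieB)
    (acc : List ((Int × Int) × String)) : List ((Int × Int) × String) × Option Nat :=
  match rest with
  | [] => (acc, none)
  | ch :: rest' =>
    match nd with
    | .mk _ cs =>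
      match kidGet cs ch with
      | none => (acc, some (e + 1))
      | some (.mk w cs') =>
        let acc' := if w then
            acc ++ [(((start : Int), ((e + 1 : Nat) : Int)),
                     String.ofList (PySem.List.slice l (some (start : Int)) (some ((e + 1 : Nat) : Int))))]
          else acc
        if hasKids cs' then walkB l start (e + 1) rest' (.mk w cs') acc'
        else (acc', some (e + 1))

-- termination helper for outerB: a 'start = …; break' always moves start forward
theorem walkB_snd_lt (l : List Char) (rest : List Char) :
    ∀ (start e : Nat) (nd : TrieB) (acc a : List ((Int × Int) × String)) (s' : Nat),
      walkB l start e rest nd acc = (a, some s') → e < s' := by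
  induction rest with
  | nil => intro start e nd acc a s' h; simp [walkB] at h
  | cons ch rest' ih =>
    intro start e nd acc a s' h
    cases nd with
    | mk b cs =>
      rw [walkB] at h
      cases hk : kidGet cs ch with
      | none => rw [hk] at h; simp at h; omega
      | some nd' =>
        cases nd' with
        | mk w cs' =>
          rw [hk] at h
          simp only at h
          by_cases hky : hasKids cs' = true
          · rw [if_pos hky] at h
            have := ih start (e + 1) _ _ _ _ h
            omega
          · rw [if_neg hky] at h; simp at h; omega

def outerB (l : List Char) (t : TrieB) (start : Nat)
    (acc : List ((Int × Int) × String)) : List ((Int × Int) × String) :=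
  if h : start < l.length then
    match hw : walkB l start start (l.drop start) t acc with
    | (a, none) => a
    | (a, some s') => outerB l t s' a
  else acc
termination_by l.length - start
decreasing_by
  have := walkB_snd_lt l (l.drop start) start start t acc a s' hw
  omega

def parse_alt (line : String) (vocab : List String) : List ((Int × Int) × String) :=
  let root := trieOfVocab vocab
  outerB line.toList root 0 []

-- ===== PRECONDITION & SPEC =====
def Spec_parse (line : String) (vocab : List String) (out : List ((Int × Int) × String)) : Prop := out = parse_alt line vocab
instance (line : String) (vocab : List String) (out : List ((Int × Int) × String)) : Decidable (Spec_parse line vocab out) := by unfold Spec_parse; infer_instance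

-- ===== CLAIM (what is proved, stated in full; the proofs are below) =====
def Claim_equal_parse : Prop := ∀ (line : String) (vocab : List String), Dom_parse line vocab → Spec_parse line vocab (parse line vocab)

-- ===== LEMMAS AND PROOFS =====

-- proof-only trie observers
def trieFind : TrieB → List Char → Option TrieB
  | t, [] => some t
  | .mk _ cs, ch :: p =>
    match kidGet cs ch with
    | none => none
    | some t' => trieFind t' p

def wordAt (t : TrieB) (p : List Char) : Bool :=
  match trieFind t p with
  | some (.mk b _) => b
  | none => false

def kidsAt (t : TrieB) (p : List Char) : Bool :=
  match trieFind t p with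
  | some (.mk _ cs) => hasKids cs
  | none => false

theorem wordAt_nil (b : Bool) (cs : TrieKids) : wordAt (TrieB.mk b cs) [] = b := rfl

theorem kidsAt_nil (b : Bool) (cs : TrieKids) : kidsAt (TrieB.mk b cs) [] = hasKids cs := rfl

theorem wordAt_cons (b : Bool) (cs : TrieKids) (a : Char) (p : List Char) :
    wordAt (TrieB.mk b cs) (a :: p)
      = (match kidGet cs a with | none => false | some t' => wordAt t' p) := by
  cases hk : kidGet cs a <;> simp [wordAt, trieFind, hk]

theorem kidsAt_cons (b : Bool) (cs : TrieKids) (a : Char) (p : List Char) :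
    kidsAt (TrieB.mk b cs) (a :: p)
      = (match kidGet cs a with | none => false | some t' => kidsAt t' p) := by
  cases hk : kidGet cs a <;> simp [kidsAt, trieFind, hk]

theorem wordAt_empty (p : List Char) : wordAt (TrieB.mk false TrieKids.nil) p = false := by
  cases p with
  | nil => rfl
  | cons a p => rw [wordAt_cons]; simp [kidGet]

theorem kidsAt_empty (p : List Char) : kidsAt (TrieB.mk false TrieKids.nil) p = false := by
  cases p with
  | nil => simp [kidsAt_nil, hasKids]
  | cons a p => rw [kidsAt_cons]; simp [kidGet]

theorem kidGet_kidsInsert (cs : TrieKids) (ch c : Char) (w : List Char) :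
    kidGet (kidsInsert cs ch w) c =
      if c = ch then some (trieInsert ((kidGet cs ch).getD (TrieB.mk false TrieKids.nil)) w)
      else kidGet cs c :=
  match cs with
  | .nil => by
    by_cases h : c = ch
    · subst h; simp [kidsInsert, kidGet]
    · simp [kidsInsert, kidGet, h, Ne.symm h]
  | .cons c' t rest => by
    by_cases h1 : c' = ch
    · subst h1
      simp only [kidsInsert, if_pos rfl]
      by_cases h2 : c' = c
      · subst h2; simp [kidGet]
      · simp [kidGet, h2, Ne.symm h2]
    · simp only [kidsInsert, if_neg h1]
      by_cases h2 : c' = c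
      · subst h2
        simp [kidGet, h1]
      · have := kidGet_kidsInsert rest ch c w
        simp [kidGet, h2, h1, this]
  termination_by sizeOf cs

theorem hasKids_kidsInsert (cs : TrieKids) (ch : Char) (w : List Char) :
    hasKids (kidsInsert cs ch w) = true := by
  cases cs with
  | nil => simp [kidsInsert, hasKids]
  | cons c t rest => by_cases h : c = ch <;> simp [kidsInsert, h, hasKids]

theorem wordAt_insert (p : List Char) : ∀ (w : List Char) (t : TrieB),
    wordAt (trieInsert t w) p = ((p == w) || wordAt t p) := by
  induction p with
  | nil =>
    intro w t
    cases t with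
    | mk b cs => cases w <;> simp [trieInsert, wordAt_nil]
  | cons a p' ih =>
    intro w t
    cases t with
    | mk b cs =>
      cases w with
      | nil =>
        simp only [trieInsert]
        rw [wordAt_cons, wordAt_cons]
        simp
      | cons c w' =>
        simp only [trieInsert]
        rw [wordAt_cons, wordAt_cons, kidGet_kidsInsert]
        by_cases hac : a = c
        · subst hac
          rw [if_pos rfl]
          cases hk : kidGet cs a with
          | none => simp [ih, wordAt_empty, List.cons_beq_cons]
          | some t0 => simp [ih, List.cons_beq_cons]
        · have hb : ((a :: p' : List Char) == (c :: w')) = false := by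
            simp [List.cons_beq_cons, hac]
          rw [if_neg hac, hb]
          simp

theorem kidsAt_insert (p : List Char) : ∀ (w : List Char) (t : TrieB),
    kidsAt (trieInsert t w) p = (decide (p ≠ w ∧ p <+: w) || kidsAt t p) := by
  induction p with
  | nil =>
    intro w t
    cases t with
    | mk b cs =>
      cases w with
      | nil => simp [trieInsert, kidsAt_nil]
      | cons c w' => simp [trieInsert, kidsAt_nil, hasKids_kidsInsert]
  | cons a p' ih =>
    intro w t
    cases t with
    | mk b cs =>
      cases w with
      | nil =>
        simp only [trieInsert]
        rw [kidsAt_cons, kidsAt_cons]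
        simp
      | cons c w' =>
        simp only [trieInsert]
        rw [kidsAt_cons, kidsAt_cons, kidGet_kidsInsert]
        by_cases hac : a = c
        · subst hac
          rw [if_pos rfl]
          have hpw : (decide ((a :: p' : List Char) ≠ (a :: w') ∧ (a :: p') <+: (a :: w')))
              = decide (p' ≠ w' ∧ p' <+: w') := by
            simp [List.cons_prefix_cons]
          cases hk : kidGet cs a with
          | none => simp [ih, kidsAt_empty, hpw, List.cons_prefix_cons]
          | some t0 => simp [ih, hpw, List.cons_prefix_cons]
        · have hpw : (decide ((a :: p' : List Char) ≠ (c :: w') ∧ (a :: p') <+: (c :: w'))) = false := by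
            simp [List.cons_prefix_cons, hac]
          rw [if_neg hac, hpw]
          simp

theorem wordAt_foldl (V : List String) : ∀ (t : TrieB) (p : List Char),
    wordAt (V.foldl (fun t w => trieInsert t w.toList) t) p
      = (wordAt t p || V.any (fun w => w.toList == p)) := by
  induction V with
  | nil => intro t p; simp
  | cons w V' ih =>
    intro t p
    simp only [List.foldl_cons, List.any_cons, ih, wordAt_insert]
    have hsy : ((p == w.toList) : Bool) = (w.toList == p) := by
      by_cases h : p = w.toList
      · simp [h]
      · simp [h, Ne.symm h]
    rw [hsy]
    cases (w.toList == p) <;> cases wordAt t p <;> simp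

theorem kidsAt_foldl (V : List String) : ∀ (t : TrieB) (p : List Char),
    kidsAt (V.foldl (fun t w => trieInsert t w.toList) t) p
      = (kidsAt t p || V.any (fun w => decide (p ≠ w.toList ∧ p <+: w.toList))) := by
  induction V with
  | nil => intro t p; simp
  | cons w V' ih =>
    intro t p
    simp only [List.foldl_cons, List.any_cons, ih, kidsAt_insert]
    cases (decide (p ≠ w.toList ∧ p <+: w.toList)) <;> cases kidsAt t p <;> simp

theorem trieFind_append (p : List Char) : ∀ (t : TrieB) (c : Char),
    trieFind t (p ++ [c]) =
      (trieFind t p).bind (fun nd => match nd with | .mk _ cs => kidGet cs c) := by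
  induction p with
  | nil =>
    intro t c
    cases t with
    | mk b cs => simp [trieFind]; cases kidGet cs c <;> simp [trieFind]
  | cons a p' ih =>
    intro t c
    cases t with
    | mk b cs =>
      simp only [List.cons_append, trieFind]
      cases kidGet cs a <;> simp [ih]

theorem eq_ofList_iff (v : String) (p : List Char) : v = String.ofList p ↔ v.toList = p :=
  ⟨fun h => by rw [h]; simp, fun h => by rw [← h]; simp⟩

-- A's membership test equals the trie's is_word flag
theorem contains_eq_wordAt (V : List String) (p : List Char) :
    V.contains (String.ofList p) = wordAt (trieOfVocab V) p := by
  rw [trieOfVocab, wordAt_foldl, wordAt_empty]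
  simp only [Bool.false_or]
  rw [Bool.eq_iff_iff]
  simp only [List.contains_eq_mem, decide_eq_true_eq, List.any_eq_true, beq_iff_eq]
  constructor
  · intro h; exact ⟨String.ofList p, h, by simp⟩
  · rintro ⟨w, hw, h⟩
    have : w = String.ofList p := (eq_ofList_iff w p).mpr h
    exact this ▸ hw

-- A's strict-extension filter is nonempty iff the trie node has children
theorem extFilter_iff_kidsAt (V : List String) (p : List Char) :
    ((V.filter (fun v => PySem.Str.startswith v (String.ofList p) && !(v == String.ofList p))).length > 0)
      ↔ kidsAt (trieOfVocab V) p = true := by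
  rw [trieOfVocab, kidsAt_foldl, kidsAt_empty]
  simp only [Bool.false_or]
  have hpt : ∀ v : String,
      (PySem.Str.startswith v (String.ofList p) && !(v == String.ofList p))
        = decide (p ≠ v.toList ∧ p <+: v.toList) := by
    intro v
    rw [Bool.eq_iff_iff]
    simp only [Bool.and_eq_true, Bool.not_eq_true', beq_eq_false_iff_ne, decide_eq_true_eq]
    constructor
    · rintro ⟨h1, h2⟩
      have h1' : p <+: v.toList := by
        have := (PySem.Chars.startswith_iff v.toList (String.ofList p).toList).mp (by simpa using h1)
        simpa using this
      exact ⟨fun hh => h2 ((eq_ofList_iff v p).mpr hh.symm), h1'⟩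
    · rintro ⟨h1, h2⟩
      refine ⟨?_, fun hh => h1 ((eq_ofList_iff v p).mp hh).symm⟩
      have : (String.ofList p).toList <+: v.toList := by simpa using h2
      simpa using (PySem.Chars.startswith_iff v.toList (String.ofList p).toList).mpr this
  simp only [hpt, gt_iff_lt, List.length_filter_pos_iff, List.any_eq_true, decide_eq_true_eq]

-- slice facts
theorem slice_self (l : List Char) (start : Nat) :
    PySem.List.slice l (some (start : Int)) (some (start : Int)) = [] := by
  rw [PySem.List.slice_natCast]; simp

theorem slice_snoc (l : List Char) (start e : Nat) (ch : Char) (rest' : List Char)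
    (h1 : start ≤ e) (hdrop : l.drop e = ch :: rest') :
    PySem.List.slice l (some (start : Int)) (some ((e + 1 : Nat) : Int))
      = PySem.List.slice l (some (start : Int)) (some ((e : Nat) : Int)) ++ [ch] := by
  rw [PySem.List.slice_natCast, PySem.List.slice_natCast]
  have he : e + 1 - start = (e - start) + 1 := by omega
  rw [he, List.take_succ]
  have h3 : l[e]? = some ch := by
    have h0 : (l.drop e)[0]? = some ch := by rw [hdrop]; rfl
    rwa [List.getElem?_drop, Nat.add_zero] at h0
  have hget : (l.drop start)[e - start]? = some ch := by
    rw [List.getElem?_drop, show start + (e - start) = e from by omega]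
    exact h3
  rw [hget]
  rfl

theorem drop_succ_of_drop (l : List Char) (e : Nat) (ch : Char) (rest' : List Char)
    (hdrop : l.drop e = ch :: rest') : l.drop (e + 1) = rest' := by
  have : l.drop (e + 1) = (l.drop e).drop 1 := by
    rw [List.drop_drop]
  rw [this, hdrop]
  simp

theorem lt_length_of_drop (l : List Char) (e : Nat) (ch : Char) (rest' : List Char)
    (hdrop : l.drop e = ch :: rest') : e < l.length := by
  by_contra h
  rw [List.drop_eq_nil_of_le (by omega)] at hdrop
  simp at hdrop

-- inner simulation: A's loop vs Source B's trie walk, at matching states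
theorem sim_inner (l : List Char) (V : List String) (start : Nat)
    (H : ∀ s' acc₂, start < s' → parseLoopA l V s' (s' + 1) acc₂ = outerB l (trieOfVocab V) s' acc₂) :
    ∀ (rest : List Char) (e : Nat) (acc : List ((Int × Int) × String)) (nd : TrieB),
      start ≤ e → rest = l.drop e →
      trieFind (trieOfVocab V) (PySem.List.slice l (some (start : Int)) (some (e : Int))) = some nd →
      parseLoopA l V start (e + 1) acc =
        (match walkB l start e rest nd acc with
         | (a, none) => a
         | (a, some s') => outerB l (trieOfVocab V) s' a) := by
  intro rest
  induction rest with
  | nil =>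
    intro e acc nd hse hdrop hfind
    have hlen : l.length ≤ e := by
      by_contra h
      have := List.drop_eq_nil_iff.mp hdrop.symm
      omega
    rw [parseLoopA, dif_neg (by omega)]
    simp [walkB]
  | cons ch rest' ih =>
    intro e acc nd hse hdrop hfind
    have hel : e < l.length := lt_length_of_drop l e ch rest' hdrop.symm
    have hsnoc := slice_snoc l start e ch rest' hse hdrop.symm
    have hdrop' : rest' = l.drop (e + 1) := (drop_succ_of_drop l e ch rest' hdrop.symm).symm
    cases nd with
    | mk b cs =>
      rw [parseLoopA, dif_pos (by omega)]
      rw [walkB]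
      cases hk : kidGet cs ch with
      | none =>
        have hfind' : trieFind (trieOfVocab V)
            (PySem.List.slice l (some (start : Int)) (some ((e + 1 : Nat) : Int))) = none := by
          rw [hsnoc, trieFind_append, hfind]; simp [hk]
        have hw : V.contains (String.ofList (PySem.List.slice l (some (start : Int)) (some ((e + 1 : Nat) : Int)))) = false := by
          rw [contains_eq_wordAt, wordAt, hfind']
        have hkAt : ¬ ((V.filter (fun v => PySem.Str.startswith v (String.ofList (PySem.List.slice l (some (start : Int)) (some ((e + 1 : Nat) : Int)))) && !(v == String.ofList (PySem.List.slice l (some (start : Int)) (some ((e + 1 : Nat) : Int)))))).length > 0) := by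
          rw [extFilter_iff_kidsAt, kidsAt, hfind']
          simp
        simp only [hw, if_false, Bool.false_eq_true, if_neg hkAt]
        exact H (e + 1) acc (by omega)
      | some nd' =>
        cases nd' with
        | mk w cs' =>
          have hfind' : trieFind (trieOfVocab V)
              (PySem.List.slice l (some (start : Int)) (some ((e + 1 : Nat) : Int))) = some (.mk w cs') := by
            rw [hsnoc, trieFind_append, hfind]; simp [hk]
          have hwEq : V.contains (String.ofList (PySem.List.slice l (some (start : Int)) (some ((e + 1 : Nat) : Int)))) = w := by
            rw [contains_eq_wordAt, wordAt, hfind']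
          have hkAt : ((V.filter (fun v => PySem.Str.startswith v (String.ofList (PySem.List.slice l (some (start : Int)) (some ((e + 1 : Nat) : Int)))) && !(v == String.ofList (PySem.List.slice l (some (start : Int)) (some ((e + 1 : Nat) : Int)))))).length > 0) ↔ hasKids cs' = true := by
            rw [extFilter_iff_kidsAt, kidsAt, hfind']
          simp only [hwEq]
          by_cases hky : hasKids cs' = true
          · rw [if_pos (hkAt.mpr hky), if_pos hky]
            exact ih (e + 1) _ (.mk w cs') (by omega) hdrop' hfind'
          · rw [if_neg (fun hh => hky (hkAt.mp hh)), if_neg hky]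
            exact H (e + 1) _ (by omega)

theorem sim_outer (l : List Char) (V : List String) :
    ∀ (start : Nat) (acc : List ((Int × Int) × String)),
      parseLoopA l V start (start + 1) acc = outerB l (trieOfVocab V) start acc := by
  suffices h : ∀ k start acc, l.length - start < k →
      parseLoopA l V start (start + 1) acc = outerB l (trieOfVocab V) start acc by
    intro start acc; exact h (l.length - start + 1) start acc (by omega)
  intro k
  induction k with
  | zero => intro start acc h; omega
  | succ k ih =>
    intro start acc hk
    by_cases hs : start < l.length
    · have H : ∀ s' acc₂, start < s' →
          parseLoopA l V s' (s' + 1) acc₂ = outerB l (trieOfVocab V) s' acc₂ := by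
        intro s' acc₂ hss
        exact ih s' acc₂ (by omega)
      have hinner := sim_inner l V start H (l.drop start) start acc (trieOfVocab V)
        (le_refl _) rfl (by rw [slice_self]; rfl)
      rw [outerB, dif_pos hs]
      split
      · next a hw => rw [hinner, hw]
      · next a s' hw => rw [hinner, hw]
    · rw [parseLoopA, dif_neg (by omega), outerB, dif_neg hs]

-- ===== VERDICT (by name: the statement is the Claim_ definition above) =====
theorem parse_spec : Claim_equal_parse := by
  intro line vocab _
  unfold Spec_parse parse parse_alt
  by_cases h : line.toList.length = 0
  · have h0 : PySem.Str.len line == 0 := by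
      simp only [PySem.Str.len_eq]
      have h1 : line.toList = [] := List.length_eq_zero_iff.mp h
      have h2 := congrArg String.ofList h1
      simp at h2
      simp [h2]
    rw [if_pos h0, outerB, dif_neg (by omega)]
  · have h0 : ¬ (PySem.Str.len line == 0) := by
      simp [PySem.Str.len_eq]
      intro he; subst he; simp at h
    rw [if_neg h0]
    exact sim_outer line.toList vocab 0 []
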